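-- pv_equiv track=rewrite | github.com/flarious/Clicknext_Internship | 1. addToN.py | addToN
-- ===== SOURCE A (Python) =====
-- def addToN(arr, sum):
--     result = ''
--
--     for i in range(0, len(arr)):
--         for j in range(i + 1, len(arr)):
--             if(arr[i] + arr[j]) == sum:
--                 if (len(result) != 0):
--                     result += '\n'
--                 result += str(arr[i]) + ', ' + str(arr[j])
--
--     return result
-- ===== SOURCE B (Python) =====
-- def addToN(arr, sum):
--     # one pass with a running suffix counter: every match for arr[i] pairs it
--     # with the value sum-arr[i], so the line text per i is fixed and repeated
--     # count times
--     counts = {}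
--     for x in arr:
--         counts[x] = counts.get(x, 0) + 1
--     lines = []
--     for x in arr:
--         counts[x] = counts[x] - 1
--         c = counts.get(sum - x, 0)
--         lines.extend([str(x) + ', ' + str(sum - x)] * c)
--     return '\n'.join(lines)
-- ===== Notes on version B (the rewrite author's own statement) =====
-- stated objective: faster
-- what changed: Replaced the O(n^2) nested index scan by a single pass over a running suffix counter (hash map): for each element the matching partner value is sum-x, so the line is emitted count-many times at once and the result is joined at the end.
import Mathlib
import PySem

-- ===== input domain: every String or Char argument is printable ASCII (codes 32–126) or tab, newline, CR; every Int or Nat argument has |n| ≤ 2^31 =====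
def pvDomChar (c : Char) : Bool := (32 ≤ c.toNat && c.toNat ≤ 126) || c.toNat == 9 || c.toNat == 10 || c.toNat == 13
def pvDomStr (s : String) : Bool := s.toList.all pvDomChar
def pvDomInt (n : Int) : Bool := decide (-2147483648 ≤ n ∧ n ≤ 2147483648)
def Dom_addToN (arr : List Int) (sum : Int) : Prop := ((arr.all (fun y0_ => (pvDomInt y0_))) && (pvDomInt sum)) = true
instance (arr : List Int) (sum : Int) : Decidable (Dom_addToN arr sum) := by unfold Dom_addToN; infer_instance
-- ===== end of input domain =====

-- B replaces A's O(n^2) nested index scan by one pass over a running suffix counter,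
-- emitting each line the counted number of times and joining at the end (objective: faster).

-- ===== PORT A =====
def addToN (arr : List Int) (sum : Int) : String :=
  (PySem.List.pyRange 0 arr.length 1).foldl (fun result i =>
    (PySem.List.pyRange (i + 1) arr.length 1).foldl (fun result j =>
      if PySem.List.pyGetD arr i 0 + PySem.List.pyGetD arr j 0 == sum then
        (if PySem.Str.len result != 0 then result ++ "\n" else result)
          ++ PySem.Int.toStr (PySem.List.pyGetD arr i 0) ++ ", "
          ++ PySem.Int.toStr (PySem.List.pyGetD arr j 0)
      else result) result) ""

-- ===== PORT B =====
def addToN_alt (arr : List Int) (sum : Int) : String :=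
  let counts := arr.foldl (fun d x => d.insert x (d.getD x 0 + 1)) (PySem.Dict.empty : PySem.Dict Int Int)
  let p := arr.foldl (fun (p : PySem.Dict Int Int × List String) x =>
      let d := p.1.insert x (p.1.getD x 0 - 1)
      let c := d.getD (sum - x) 0
      (d, p.2 ++ List.replicate c.toNat
            (PySem.Int.toStr x ++ ", " ++ PySem.Int.toStr (sum - x))))
    (counts, [])
  PySem.Str.join "\n" p.2

-- ===== PRECONDITION & SPEC =====
def Spec_addToN (arr : List Int) (sum : Int) (out : String) : Prop := out = addToN_alt arr sum
instance (arr : List Int) (sum : Int) (out : String) : Decidable (Spec_addToN arr sum out) := by unfold Spec_addToN; infer_instance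

-- ===== CLAIM (what is proved, stated in full; the proofs are below) =====
def Claim_equal_addToN : Prop := ∀ (arr : List Int) (sum : Int), Dom_addToN arr sum → Spec_addToN arr sum (addToN arr sum)

-- ===== LEMMAS AND PROOFS =====

-- the list of output lines, one block per element, in order
def pvLines (sum : Int) : List Int → List String
  | [] => []
  | x :: rest =>
      List.replicate (rest.count (sum - x))
        (PySem.Int.toStr x ++ ", " ++ PySem.Int.toStr (sum - x)) ++ pvLines sum rest

-- A's separator-appending step
def pvSep (r s : String) : String :=
  (if PySem.Str.len r != 0 then r ++ "\n" else r) ++ s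

-- every produced line is a nonempty string
lemma pvLine_ne (x y : Int) : PySem.Int.toStr x ++ ", " ++ PySem.Int.toStr y ≠ "" := by
  intro h
  have := congrArg String.toList h
  simp at this

lemma pvLines_ne (sum : Int) (l : List Int) : ∀ s ∈ pvLines sum l, s ≠ "" := by
  induction l with
  | nil => simp [pvLines]
  | cons x rest ih =>
      intro s hs
      simp only [pvLines, List.mem_append, List.mem_replicate] at hs
      rcases hs with ⟨-, rfl⟩ | hs
      · exact pvLine_ne _ _
      · exact ih s hs

-- A-side: the inner loop over the suffix appends the block of equal lines
lemma pvInner (sum x : Int) (rest : List Int) (r : String) :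
    rest.foldl (fun result y =>
      if x + y == sum then
        (if PySem.Str.len result != 0 then result ++ "\n" else result)
          ++ PySem.Int.toStr x ++ ", " ++ PySem.Int.toStr y
      else result) r
    = (List.replicate (rest.count (sum - x))
        (PySem.Int.toStr x ++ ", " ++ PySem.Int.toStr (sum - x))).foldl pvSep r := by
  induction rest generalizing r with
  | nil => simp
  | cons y t ih =>
      simp only [List.foldl_cons]
      by_cases h : x + y = sum
      · have hb : (x + y == sum) = true := by simp [h]
        have hy : sum - x = y := by omega
        have hc : (y :: t).count (sum - x) = t.count (sum - x) + 1 := by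
          rw [hy, List.count_cons_self]
        rw [hc, List.replicate_succ, List.foldl_cons, if_pos hb, ih]
        congr 1
        simp [pvSep, hy, String.append_assoc]
      · have hb : (x + y == sum) = false := by simp [h]
        have hy : y ≠ sum - x := by omega
        rw [List.count_cons_of_ne hy, hb]
        simp only [Bool.false_eq_true, if_false]
        exact ih r

-- A-side: the whole nested loop, generalized over the start of the outer range
lemma pvOuter (sum : Int) (arr : List Int) : ∀ (k : Nat) (r : String),
    (PySem.List.pyRange k arr.length 1).foldl (fun result i =>
      (PySem.List.pyRange (i + 1) arr.length 1).foldl (fun result j =>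
        if PySem.List.pyGetD arr i 0 + PySem.List.pyGetD arr j 0 == sum then
          (if PySem.Str.len result != 0 then result ++ "\n" else result)
            ++ PySem.Int.toStr (PySem.List.pyGetD arr i 0) ++ ", "
            ++ PySem.Int.toStr (PySem.List.pyGetD arr j 0)
        else result) result) r
    = (pvLines sum (arr.drop k)).foldl pvSep r := by
  have H : ∀ (m k : Nat) (r : String), arr.length - k = m →
      (PySem.List.pyRange k arr.length 1).foldl (fun result i =>
        (PySem.List.pyRange (i + 1) arr.length 1).foldl (fun result j =>
          if PySem.List.pyGetD arr i 0 + PySem.List.pyGetD arr j 0 == sum then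
            (if PySem.Str.len result != 0 then result ++ "\n" else result)
              ++ PySem.Int.toStr (PySem.List.pyGetD arr i 0) ++ ", "
              ++ PySem.Int.toStr (PySem.List.pyGetD arr j 0)
          else result) result) r
      = (pvLines sum (arr.drop k)).foldl pvSep r := by
    intro m
    induction m with
    | zero =>
        intro k r hm
        have hk : arr.length ≤ k := by omega
        rw [PySem.List.pyRange_one_eq_nil (by exact_mod_cast hk),
            List.drop_eq_nil_of_le hk]
        simp [pvLines]
    | succ m ihm =>
        intro k r hm
        have hk : k < arr.length := by omega
        rw [PySem.List.pyRange_one_cons (by exact_mod_cast hk), List.foldl_cons,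
            PySem.List.foldl_pyRange_pyGetD' arr 0
              (fun result y =>
                if PySem.List.pyGetD arr (k : Int) 0 + y == sum then
                  (if PySem.Str.len result != 0 then result ++ "\n" else result)
                    ++ PySem.Int.toStr (PySem.List.pyGetD arr (k : Int) 0) ++ ", "
                    ++ PySem.Int.toStr y
                else result) r (by positivity)]
        rw [show ((k : Int) + 1).toNat = k + 1 by omega]
        rw [pvInner sum (PySem.List.pyGetD arr (k : Int) 0) (arr.drop (k + 1)) r]
        rw [show ((k : Int) + 1) = ((k + 1 : Nat) : Int) by push_cast; ring]
        rw [ihm (k + 1) _ (by omega)]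
        rw [PySem.List.pyGetD_ofNat arr k 0 hk,
            List.drop_eq_getElem_cons hk]
        simp [pvLines, List.foldl_append]
  intro k r
  exact H (arr.length - k) k r rfl

lemma pvA_eq (arr : List Int) (sum : Int) :
    addToN arr sum = (pvLines sum arr).foldl pvSep "" := by
  have := pvOuter sum arr 0 ""
  simpa [addToN] using this

-- B-side: decrement loop invariant
lemma pvB_loop (sum : Int) (l : List Int) : ∀ (d : PySem.Dict Int Int) (ls : List String),
    (∀ v, d.getD v 0 = (l.count v : Int)) →
    (l.foldl (fun (p : PySem.Dict Int Int × List String) x =>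
      let d := p.1.insert x (p.1.getD x 0 - 1)
      let c := d.getD (sum - x) 0
      (d, p.2 ++ List.replicate c.toNat
            (PySem.Int.toStr x ++ ", " ++ PySem.Int.toStr (sum - x)))) (d, ls)).2
    = ls ++ pvLines sum l := by
  induction l with
  | nil => simp [pvLines]
  | cons x t ih =>
      intro d ls hd
      have hd' : ∀ v, (d.insert x (d.getD x 0 - 1)).getD v 0 = (t.count v : Int) := by
        intro v
        rw [PySem.Dict.getD_insert]
        by_cases hv : v = x
        · rw [if_pos hv, hd x, hv, List.count_cons_self]
          push_cast; ring
        · rw [if_neg hv, hd v, List.count_cons_of_ne (fun he => hv he.symm)]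
      simp only [List.foldl_cons]
      rw [ih _ _ hd']
      have hc : ((d.insert x (d.getD x 0 - 1)).getD (sum - x) 0).toNat = t.count (sum - x) := by
        rw [hd' (sum - x)]; simp
      simp [pvLines, hc, List.append_assoc]

lemma pvB_eq (arr : List Int) (sum : Int) :
    addToN_alt arr sum = PySem.Str.join "\n" (pvLines sum arr) := by
  show PySem.Str.join "\n" (arr.foldl (fun (p : PySem.Dict Int Int × List String) x =>
      let d := p.1.insert x (p.1.getD x 0 - 1)
      let c := d.getD (sum - x) 0
      (d, p.2 ++ List.replicate c.toNat
            (PySem.Int.toStr x ++ ", " ++ PySem.Int.toStr (sum - x))))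
    (arr.foldl (fun d x => d.insert x (d.getD x 0 + 1)) (PySem.Dict.empty : PySem.Dict Int Int), [])).2
    = PySem.Str.join "\n" (pvLines sum arr)
  have hcnt : ∀ v, (arr.foldl (fun d x => d.insert x (d.getD x 0 + 1))
      (PySem.Dict.empty : PySem.Dict Int Int)).getD v 0 = (arr.count v : Int) := by
    intro v
    rw [PySem.Dict.getD_foldl_insert_add_one]
    simp
  rw [pvB_loop sum arr _ [] hcnt]
  simp

-- joining helpers on PySem.Str.join
lemma pvJoin_singleton (a : String) : PySem.Str.join "\n" [a] = a := by
  apply String.toList_inj.mp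
  simp [PySem.Str.join, PySem.Chars.join_singleton]

lemma pvJoin_cons_cons (a b : String) (t : List String) :
    PySem.Str.join "\n" (a :: b :: t) = a ++ "\n" ++ PySem.Str.join "\n" (b :: t) := by
  apply String.toList_inj.mp
  simp [PySem.Str.join, PySem.Chars.join_cons_cons]

lemma pvNl_ne (a b : String) : a ++ "\n" ++ b ≠ "" := by
  intro h
  have := congrArg String.toList h
  simp at this

-- joining: folding pvSep from a nonempty accumulator is joining with the accumulator in front
lemma pvSepFold_ne (t : List String) : ∀ (r : String), r ≠ "" → (∀ s ∈ t, s ≠ "") →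
    t.foldl pvSep r = PySem.Str.join "\n" (r :: t) := by
  induction t with
  | nil =>
      intro r hr _
      rw [List.foldl_nil, pvJoin_singleton]
  | cons s t ih =>
      intro r hr hall
      have hrl : r.toList ≠ [] := fun hl => hr (String.toList_inj.mp (by simpa using hl))
      have hpv : pvSep r s = r ++ "\n" ++ s := by
        unfold pvSep
        rw [if_pos (by simpa [bne] using hrl), String.append_assoc]
      rw [List.foldl_cons, hpv, ih _ (pvNl_ne r s) (fun u hu => hall u (by simp [hu]))]
      cases t with
      | nil => rw [pvJoin_singleton, pvJoin_cons_cons, pvJoin_singleton]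
      | cons u t' =>
          rw [pvJoin_cons_cons, pvJoin_cons_cons r s, pvJoin_cons_cons s u]
          simp [String.append_assoc]

lemma pvSepFold (ss : List String) (h : ∀ s ∈ ss, s ≠ "") :
    ss.foldl pvSep "" = PySem.Str.join "\n" ss := by
  cases ss with
  | nil => simp [PySem.Str.join]
  | cons s t =>
      have hs : s ≠ "" := h s (by simp)
      have : pvSep "" s = s := by simp [pvSep]
      rw [List.foldl_cons, this, pvSepFold_ne t s hs (fun u hu => h u (by simp [hu]))]

-- ===== VERDICT (by name: the statement is the Claim_ definition above) =====
theorem addToN_spec : Claim_equal_addToN := by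
  intro arr sum _
  show addToN arr sum = addToN_alt arr sum
  rw [pvA_eq, pvB_eq, pvSepFold _ (pvLines_ne sum arr)]
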